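-- pv_equiv track=rewrite | github.com/erikafarias/tp_palitos | main.py | armar_piramide
-- ===== SOURCE A (Python) =====
-- def armar_piramide(cantidad_palitos: int) -> list[list[str]]:
--     """
--         PRE: Recibe un entero que representa la cantidad total de palitos
--         de la pirámide, si el mismo no forma una pirámide perfecta,
--         se eliminan los sobrantes
--         POST: Devuelve la pirámide perfecta
--     """
--     piramide: list[list[str]] = []
--     fila: int = 0
--     palitos_agregados: int = 0
--     seguir_agregando: bool = True
--     while (seguir_agregando):
--         fila_actual = []
--         fila += 1
--         for palito in range(fila):
--             fila_actual.append('|')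
--             palitos_agregados += 1
--
--         if (palitos_agregados <= cantidad_palitos):
--             piramide.append(fila_actual)
--         else:
--             seguir_agregando = False
--
--     return piramide
-- ===== SOURCE B (Python) =====
-- import math
--
--
-- def armar_piramide(cantidad_palitos: int) -> list[list[str]]:
--     if cantidad_palitos < 1:
--         return []
--     k = (math.isqrt(8 * cantidad_palitos + 1) - 1) // 2
--     return [['|'] * i for i in range(1, k + 1)]
-- ===== Notes on version B (the rewrite author's own statement) =====
-- stated objective: simpler
-- what changed: Replaces the while-loop with its running stick total and seguir_agregando flag by a closed-form row count obtained by inverting the triangular-number formula with math.isqrt, and a single comprehension emitting the rows.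
import Mathlib
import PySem

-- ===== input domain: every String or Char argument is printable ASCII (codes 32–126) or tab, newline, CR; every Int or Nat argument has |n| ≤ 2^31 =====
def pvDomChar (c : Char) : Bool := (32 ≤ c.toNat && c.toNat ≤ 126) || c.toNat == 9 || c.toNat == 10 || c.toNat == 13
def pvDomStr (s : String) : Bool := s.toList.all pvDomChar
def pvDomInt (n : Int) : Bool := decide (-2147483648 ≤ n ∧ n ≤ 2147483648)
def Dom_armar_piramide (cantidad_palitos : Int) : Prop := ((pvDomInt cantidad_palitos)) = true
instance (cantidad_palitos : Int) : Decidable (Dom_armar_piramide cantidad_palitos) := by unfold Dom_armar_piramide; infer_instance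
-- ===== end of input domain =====

-- B replaces A's accumulating while-loop by a closed-form triangular-number row count (simpler).


-- ===== PORT A =====
-- the while-loop of A: fila and palitos_agregados start at 0 and are only ever
-- incremented, so they are carried as Nat; each iteration builds the row of
-- fila+1 sticks (the inner for-range loop appending '|' fila times), adds its
-- length to the running total, and either appends the row and continues or stops.
def pvLoopA (cantidad_palitos : Int) (fila palitos_agregados : Nat)
    (piramide : List (List String)) : List (List String) :=
  let fila' := fila + 1
  let fila_actual : List String := List.replicate fila' "|"
  let palitos' := palitos_agregados + fila'
  if (palitos' : Int) ≤ cantidad_palitos then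
    pvLoopA cantidad_palitos fila' palitos' (piramide ++ [fila_actual])
  else
    piramide
termination_by (cantidad_palitos + 1 - palitos_agregados).toNat
decreasing_by omega

def armar_piramide (cantidad_palitos : Int) : List (List String) :=
  pvLoopA cantidad_palitos 0 0 []

-- ===== PORT B =====
def armar_piramide_alt (cantidad_palitos : Int) : List (List String) :=
  if cantidad_palitos < 1 then []
  else
    let k := (Nat.sqrt (8 * cantidad_palitos.toNat + 1) - 1) / 2
    (List.range k).map (fun i => List.replicate (i + 1) "|")

-- ===== PRECONDITION & SPEC =====
def Spec_armar_piramide (cantidad_palitos : Int) (out : List (List String)) : Prop := out = armar_piramide_alt cantidad_palitos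
instance (cantidad_palitos : Int) (out : List (List String)) : Decidable (Spec_armar_piramide cantidad_palitos out) := by unfold Spec_armar_piramide; infer_instance

-- ===== CLAIM (what is proved, stated in full; the proofs are below) =====
def Claim_equal_armar_piramide : Prop := ∀ (cantidad_palitos : Int), Dom_armar_piramide cantidad_palitos → Spec_armar_piramide cantidad_palitos (armar_piramide cantidad_palitos)

-- ===== LEMMAS AND PROOFS =====

/-- triangular numbers -/
def pvT : Nat → Nat
  | 0 => 0
  | f + 1 => pvT f + f + 1

/-- B's closed-form row count -/
def pvK (m : Nat) : Nat := (Nat.sqrt (8 * m + 1) - 1) / 2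

lemma two_pvT (k : Nat) : 2 * pvT k = k * (k + 1) := by
  induction k with
  | zero => rfl
  | succ f ih => simp only [pvT]; nlinarith [ih]

lemma pvT_mono {i j : Nat} (h : i ≤ j) : pvT i ≤ pvT j := by
  induction j with
  | zero =>
    have h0 : i = 0 := Nat.le_zero.mp h
    subst h0; exact le_refl _
  | succ f ih =>
    rcases Nat.lt_or_ge i (f + 1) with h' | h'
    · have := ih (by omega); simp only [pvT]; omega
    · have : i = f + 1 := by omega
      subst this; exact le_refl _

lemma pvK_bounds (m : Nat) : pvT (pvK m) ≤ m ∧ m < pvT (pvK m + 1) := by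
  have h1 : Nat.sqrt (8 * m + 1) ^ 2 ≤ 8 * m + 1 := Nat.sqrt_le' _
  have h2 : 8 * m + 1 < (Nat.sqrt (8 * m + 1) + 1) ^ 2 := Nat.lt_succ_sqrt' _
  have hs1 : 1 ≤ Nat.sqrt (8 * m + 1) := Nat.le_sqrt'.mpr (by omega)
  set s := Nat.sqrt (8 * m + 1) with hs
  have hk1 : 2 * pvK m + 1 ≤ s := by unfold pvK; omega
  have hk2 : s ≤ 2 * pvK m + 2 := by unfold pvK; omega
  constructor
  · have hsq : (2 * pvK m + 1) ^ 2 ≤ s ^ 2 := Nat.pow_le_pow_left hk1 2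
    nlinarith [two_pvT (pvK m)]
  · have hsq : (s + 1) ^ 2 ≤ (2 * pvK m + 3) ^ 2 := Nat.pow_le_pow_left (by omega) 2
    nlinarith [two_pvT (pvK m + 1)]

lemma pvLoopA_eq (n : Int) :
    ∀ (d f : Nat) (acc : List (List String)),
      pvK n.toNat - f = d → (pvT f : Int) ≤ n →
      pvLoopA n f (pvT f) acc
        = acc ++ (List.range' (f + 1) d).map (fun i => List.replicate i "|") := by
  intro d
  induction d with
  | zero =>
    intro f acc hd hle
    have hn0 : 0 ≤ n := le_trans (by positivity) hle
    have hb := (pvK_bounds n.toNat).2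
    have hkf : pvK n.toNat ≤ f := by omega
    have hmono : pvT (pvK n.toNat + 1) ≤ pvT (f + 1) := pvT_mono (by omega)
    have hgt : ¬ ((pvT f + (f + 1) : Nat) : Int) ≤ n := by
      have : n.toNat < pvT (f + 1) := by omega
      have hpf : pvT (f + 1) = pvT f + f + 1 := rfl
      omega
    rw [pvLoopA]
    simp only [List.range', List.map_nil, List.append_nil]
    rw [if_neg (by exact_mod_cast hgt)]
  | succ d ih =>
    intro f acc hd hle
    have hn0 : 0 ≤ n := le_trans (by positivity) hle
    have hb := (pvK_bounds n.toNat).1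
    have hfk : f + 1 ≤ pvK n.toNat := by omega
    have hmono : pvT (f + 1) ≤ pvT (pvK n.toNat) := pvT_mono hfk
    have hle' : ((pvT f + (f + 1) : Nat) : Int) ≤ n := by
      have hpf : pvT (f + 1) = pvT f + f + 1 := rfl
      omega
    rw [pvLoopA]
    rw [if_pos (by exact_mod_cast hle')]
    have hstate : pvT f + (f + 1) = pvT (f + 1) := by simp [pvT]; omega
    rw [hstate]
    rw [ih (f + 1) (acc ++ [List.replicate (f + 1) "|"]) (by omega) (by omega)]
    rw [List.range'_succ]
    simp [List.append_assoc]

-- ===== VERDICT (by name: the statement is the Claim_ definition above) =====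
theorem armar_piramide_spec : Claim_equal_armar_piramide := by
  intro n _
  unfold Spec_armar_piramide armar_piramide armar_piramide_alt
  by_cases hn : n < 1
  · rw [if_pos hn, pvLoopA]
    have : ¬ (((0 : Nat) + (0 + 1) : Nat) : Int) ≤ n := by simpa using hn
    rw [if_neg this]
  · rw [if_neg hn]
    have h0 : (pvT 0 : Int) ≤ n := by simp [pvT]; omega
    have := pvLoopA_eq n (pvK n.toNat) 0 [] (by omega) h0
    simp only [pvT] at this
    rw [this]
    simp only [List.nil_append]
    rw [List.range'_eq_map_range]
    rw [List.map_map]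
    apply List.map_congr_left
    intro i _
    simp [Nat.add_comm]
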